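-- pv_equiv track=rewrite | github.com/IsabelaCaldeira/Sorbonne_TME | Semestre1/activite /activite3/1Simulation.py | est_parfait_appels_comparer
-- ===== SOURCE A (Python) =====
-- def divise (k : int , n : int) -> bool :
--     """ Pre : k > 0 and n > = 0
--     Decide si k divise n """
--     return n % k == 0
--
-- def est_parfait_appels_comparer(n : int) -> int :
--     """ Pre : n >= 1
--     Affiche le nombre d'appels à divise."""
--     i : int = 1
--     s : int = 0
--     count : int = 0
--
--     while i != n :
--         count += 1
--         if divise(i, n):
--             s = s + i
--         i = i + 1
--
--     return count
-- ===== SOURCE B (Python) =====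
-- def est_parfait_appels_comparer(n: int) -> int:
--     # Closed form: the loop runs from i=1 up to n, one divise call per step.
--     return n - 1
-- ===== Notes on version B (the rewrite author's own statement) =====
-- stated objective: faster
-- what changed: Replaced the O(n) counting loop (which also computes an unused divisor sum) with the closed form n-1.
import Mathlib
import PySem

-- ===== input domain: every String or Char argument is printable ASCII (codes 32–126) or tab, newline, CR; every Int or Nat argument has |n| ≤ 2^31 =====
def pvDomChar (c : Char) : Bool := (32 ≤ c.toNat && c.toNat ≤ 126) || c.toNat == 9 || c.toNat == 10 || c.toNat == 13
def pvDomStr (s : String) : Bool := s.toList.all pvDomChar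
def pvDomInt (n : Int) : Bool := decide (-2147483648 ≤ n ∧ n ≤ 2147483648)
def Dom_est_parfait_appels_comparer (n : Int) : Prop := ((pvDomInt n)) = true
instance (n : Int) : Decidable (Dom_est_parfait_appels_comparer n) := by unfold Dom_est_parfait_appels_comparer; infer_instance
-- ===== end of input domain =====

-- B replaces A's O(n) counting loop with the closed form n-1 (the loop body's sum s is unused).

-- ===== PORT A =====
-- divise(k, n): n % k == 0 with Python's modulo
def pvDivise (k n : Int) : Bool := PySem.Int.mod n k == 0

-- the while loop 'while i != n: count += 1; if divise(i,n): s += i; i += 1'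
-- (the 'i < n' test is a totality guard: inside Pre_ (n ≥ 1) it agrees with 'i ≠ n')
def pvLoopA (n i s count : Int) : Int :=
  if h : i < n then
    pvLoopA n (i + 1) (if pvDivise i n then s + i else s) (count + 1)
  else count
termination_by (n - i).toNat
decreasing_by
  have : 0 < n - i := by omega
  omega

def est_parfait_appels_comparer (n : Int) : Int := pvLoopA n 1 0 0

-- ===== PORT B =====
def est_parfait_appels_comparer_alt (n : Int) : Int := n - 1

-- ===== PRECONDITION & SPEC =====
-- A's loop never terminates for n < 1 (i counts up from 1 and never equals n)
def Pre_est_parfait_appels_comparer (n : Int) : Prop := 1 ≤ n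
instance (n : Int) : Decidable (Pre_est_parfait_appels_comparer n) := by
  unfold Pre_est_parfait_appels_comparer; infer_instance

def pvWitness_est_parfait_appels_comparer : Int := 6

def Spec_est_parfait_appels_comparer (n : Int) (out : Int) : Prop := out = est_parfait_appels_comparer_alt n
instance (n : Int) (out : Int) : Decidable (Spec_est_parfait_appels_comparer n out) := by
  unfold Spec_est_parfait_appels_comparer; infer_instance

-- ===== CLAIM (what is proved, stated in full; the proofs are below) =====
def Claim_equal_est_parfait_appels_comparer : Prop := ∀ (n : Int), Dom_est_parfait_appels_comparer n → Pre_est_parfait_appels_comparer n → Spec_est_parfait_appels_comparer n (est_parfait_appels_comparer n)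

-- ===== LEMMAS AND PROOFS =====
theorem pvLoopA_count (n i s count : Int) (hle : i ≤ n) : pvLoopA n i s count = count + (n - i) := by
  fun_induction pvLoopA n i s count with
  | case1 i s count h ih => simp only [dite_eq_ite] at ih; rw [ih (by omega)]; ring
  | case2 i s count h => omega

-- ===== VERDICT (by name: the statement is the Claim_ definition above) =====
theorem est_parfait_appels_comparer_spec : Claim_equal_est_parfait_appels_comparer := by
  intro n _ hpre
  unfold Spec_est_parfait_appels_comparer est_parfait_appels_comparer est_parfait_appels_comparer_alt
  rw [pvLoopA_count n 1 0 0 hpre]; ring
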